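-- pv_equiv track=rewrite | github.com/ShankarDuraisamy/leetcode | python/src/EvenDigit.py | solve
-- ===== SOURCE A (Python) =====
-- from typing import List
--
-- def solve(nums: List[int]) -> int:
-- 	result = 0
-- 	count = 0
-- 	for i, n in enumerate(nums):
-- 		while n > 0:
-- 			count += 1
-- 			n = int(n/10)
-- 		result += 1 if count %2 == 0 else 0
-- 		count = 0
-- 	return result
-- ===== SOURCE B (Python) =====
-- import bisect
-- from typing import List
--
-- def solve(nums: List[int]) -> int:
-- 	m = 0
-- 	for n in nums:
-- 		if n > m:
-- 			m = n
-- 	powers = []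
-- 	p = 1
-- 	while p <= m:
-- 		powers.append(p)
-- 		p *= 10
-- 	return sum(1 for n in nums
-- 	           if (bisect.bisect_right(powers, n) if n > 0 else 0) % 2 == 0)
-- ===== Notes on version B (the rewrite author's own statement) =====
-- stated objective: faster
-- what changed: replaces the per-element repeated-division digit-count loop with one prebuilt table of powers of ten and a bisect_right lookup per element
import Mathlib
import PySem

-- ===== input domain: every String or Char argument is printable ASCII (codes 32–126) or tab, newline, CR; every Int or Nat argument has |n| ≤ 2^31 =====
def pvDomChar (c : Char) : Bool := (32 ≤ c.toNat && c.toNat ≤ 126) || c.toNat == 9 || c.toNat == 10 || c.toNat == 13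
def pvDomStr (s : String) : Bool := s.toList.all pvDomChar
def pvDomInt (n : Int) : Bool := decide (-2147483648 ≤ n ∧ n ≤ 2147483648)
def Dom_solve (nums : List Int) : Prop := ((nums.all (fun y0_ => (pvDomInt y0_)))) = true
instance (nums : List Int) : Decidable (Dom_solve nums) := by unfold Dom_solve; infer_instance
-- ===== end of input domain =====

-- B replaces A's per-element digit-division loop by a prebuilt table of powers of ten and a
-- bisect_right lookup per element (alternative decomposition, similar cost).

-- ===== PORT A =====
-- A's inner 'while n > 0: count += 1; n = int(n/10)' (int(n/10) = n // 10 for 0 < n ≤ 2^31)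
def digitLoop (n : Int) : Int :=
  if 0 < n then digitLoop (PySem.Int.floordiv n 10) + 1 else 0
termination_by n.toNat
decreasing_by
  have h10 : PySem.Int.floordiv n 10 = n / 10 := PySem.Int.floordiv_eq_ediv_of_pos (by omega)
  rw [h10]; omega

def solve (nums : List Int) : Int :=
  nums.foldl (fun result n => result + (if digitLoop n % 2 == 0 then 1 else 0)) 0

-- ===== PORT B =====
-- the 'while p <= m: powers.append(p); p *= 10' loop of B, starting from p
def growPowers (p m : Int) : List Int :=
  if h : 0 < p ∧ p ≤ m then p :: growPowers (p * 10) m else []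
termination_by (m + 1 - p).toNat
decreasing_by
  have : p < p * 10 := by nlinarith [h.1]
  omega

-- bisect.bisect_right on a strictly increasing list = number of elements ≤ x
def bisectRight (l : List Int) (x : Int) : Nat := l.countP (· ≤ x)

def solve_alt (nums : List Int) : Int :=
  let m := nums.foldl (fun m n => if n > m then n else m) 0
  let powers := growPowers 1 m
  ((nums.countP (fun n => ((if 0 < n then bisectRight powers n else 0) % 2 == 0))) : Int)

-- ===== PRECONDITION & SPEC =====
def Spec_solve (nums : List Int) (out : Int) : Prop := out = solve_alt nums
instance (nums : List Int) (out : Int) : Decidable (Spec_solve nums out) := by unfold Spec_solve; infer_instance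

-- ===== CLAIM (what is proved, stated in full; the proofs are below) =====
def Claim_equal_solve : Prop := ∀ (nums : List Int), Dom_solve nums → Spec_solve nums (solve nums)

-- ===== LEMMAS AND PROOFS =====

-- Nat-level digit count used as a common specification of both sides
def natDigits (n : Nat) : Nat :=
  if n = 0 then 0 else natDigits (n / 10) + 1
decreasing_by omega

theorem digitLoop_eq (n : Int) : digitLoop n = (natDigits n.toNat : Int) := by
  induction n using digitLoop.induct with
  | case1 n hpos ih =>
      have h10 : PySem.Int.floordiv n 10 = n / 10 := PySem.Int.floordiv_eq_ediv_of_pos (by omega)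
      have ht : (PySem.Int.floordiv n 10).toNat = n.toNat / 10 := by rw [h10]; omega
      rw [digitLoop, if_pos hpos, ih, ht,
        show natDigits n.toNat = natDigits (n.toNat / 10) + 1 by
          conv_lhs => rw [natDigits]
          rw [if_neg (by omega)]]
      push_cast; ring
  | case2 n hpos =>
      rw [digitLoop, if_neg hpos,
        show n.toNat = 0 by omega, natDigits]
      simp

theorem countLE_growPowers (p m n : Int) (hp : 0 < p) (hn : n ≤ m) :
    (growPowers p m).countP (· ≤ n) = natDigits (n.toNat / p.toNat) := by
  rw [growPowers]
  by_cases h : 0 < p ∧ p ≤ m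
  · rw [dif_pos h, List.countP_cons,
      countLE_growPowers (p * 10) m n (by nlinarith [h.1]) hn]
    have hpt : 0 < p.toNat := by omega
    have hmul : (p * 10).toNat = p.toNat * 10 := by omega
    rw [hmul, ← Nat.div_div_eq_div_mul]
    by_cases hle : p ≤ n
    · have hne : n.toNat / p.toNat ≠ 0 := by
        have hle' : p.toNat ≤ n.toNat := by omega
        have := (Nat.one_le_div_iff hpt).mpr hle'
        omega
      conv_rhs => rw [natDigits]
      rw [if_neg hne]
      simp [hle]
    · have hz : n.toNat / p.toNat = 0 := by apply Nat.div_eq_of_lt; omega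
      have hz10 : n.toNat / p.toNat / 10 = 0 := by rw [hz]
      rw [hz10, hz]
      simp [natDigits, hle]
  · rw [dif_neg h]
    have : n.toNat / p.toNat = 0 := by apply Nat.div_eq_of_lt; omega
    simp [this, natDigits]
termination_by (m + 1 - p).toNat
decreasing_by
  have : p < p * 10 := by nlinarith [h.1]
  omega

theorem le_foldl_max (nums : List Int) (a : Int) (n : Int) (hn : n ∈ nums ∨ n ≤ a) :
    n ≤ nums.foldl (fun m n => if n > m then n else m) a := by
  induction nums generalizing a with
  | nil => simp at hn; simpa using hn
  | cons x xs ih =>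
      apply ih
      rcases hn with h | h
      · rcases List.mem_cons.mp h with h | h
        · subst h; right; dsimp only; split <;> omega
        · left; exact h
      · right; dsimp only; split <;> omega

-- ===== VERDICT (by name: the statement is the Claim_ definition above) =====
theorem solve_spec : Claim_equal_solve := by
  intro nums _
  unfold Spec_solve solve solve_alt
  set m := nums.foldl (fun m n => if n > m then n else m) 0 with hm
  -- A's fold counts the same predicate
  have key : ∀ n ∈ nums,
      (digitLoop n % 2 == 0) = ((if 0 < n then bisectRight (growPowers 1 m) n else 0) % 2 == 0) := by
    intro n hn
    by_cases hpos : 0 < n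
    · have hnm : n ≤ m := le_foldl_max nums 0 n (Or.inl hn)
      rw [if_pos hpos, bisectRight, countLE_growPowers 1 m n (by omega) hnm,
          digitLoop_eq]
      rw [Bool.eq_iff_iff]
      simp only [beq_iff_eq, Int.toNat_one, Nat.div_one]
      omega
    · rw [if_neg hpos, digitLoop, if_neg hpos]
      simp
  -- turn A's foldl-sum into a countP
  have fold_eq : ∀ (l : List Int) (acc : Int), (∀ n ∈ l, n ∈ nums) →
      l.foldl (fun result n => result + (if digitLoop n % 2 == 0 then 1 else 0)) acc
        = acc + (l.countP (fun n => ((if 0 < n then bisectRight (growPowers 1 m) n else 0) % 2 == 0)) : Int) := by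
    intro l
    induction l with
    | nil => simp
    | cons x xs ih =>
        intro acc hsub
        simp only [List.foldl_cons, List.countP_cons]
        rw [ih _ (fun n hn => hsub n (List.mem_cons_of_mem _ hn))]
        rw [key x (hsub x (List.mem_cons_self ..))]
        split <;> simp <;> ring
  simpa using fold_eq nums 0 (fun _ h => h)
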